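-- pv_equiv track=rewrite | github.com/BK-Yoo/algospot | interview/kakao/second/prg_02.py | solution
-- ===== SOURCE A (Python) =====
-- def get_v(pos, board):
--   x, y = pos
--   if 0 <= x < len(board) and 0 <= y < len(board[x]):
--     return board[x][y]
--   return None
--
-- def move(curr_pos, passed, board, jumped):
--   passed = set(passed)
--   passed.add(curr_pos)
--   curr_v = get_v(curr_pos, board)
--   i, j = curr_pos
--
--   available_steps = [(i + 1, j), (i - 1, j), (i, j - 1), (i, j + 1)]
--   valid_steps = [(pos, get_v(pos, board)) for pos in available_steps
--                  if pos not in passed and get_v(pos, board)]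
--
--   paths = []
--   for next_pos, next_v, in valid_steps:
--     if next_v > curr_v:
--       paths.append(move(next_pos, passed, board, jumped))
--     elif not jumped and next_v < curr_v:
--       paths.append(move(next_pos, passed, board, True))
--     else:
--       paths.append(len(passed))
--
--   return max(paths) if paths else len(passed)
--
-- def solution(board):
--   answers = []
--   for i in range(len(board)):
--     for j in range(len(board[i])):
--       init_pos = (i, j)
--       passed = set()
--       answers.append(move(init_pos, passed, board, False))
--   return max(answers)
-- ===== SOURCE B (Python) =====
-- def solution(board):
--     # Iterative DFS over an explicit stack of (position, visited-set, jumped) states,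
--     # seeded with every cell; a running maximum replaces the recursive max().
--     stack = [((i, j), frozenset(), False)
--              for i in range(len(board)) for j in range(len(board[i]))]
--     best = 0
--     while stack:
--         (x, y), visited, jumped = stack.pop()
--         visited = visited | {(x, y)}
--         if len(visited) > best:
--             best = len(visited)
--         cur = board[x][y]
--         for nx, ny in ((x + 1, y), (x - 1, y), (x, y - 1), (x, y + 1)):
--             if 0 <= nx < len(board) and 0 <= ny < len(board[nx]):
--                 v = board[nx][ny]
--                 if v and (nx, ny) not in visited:
--                     if v > cur:
--                         stack.append(((nx, ny), visited, jumped))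
--                     elif not jumped and v < cur:
--                         stack.append(((nx, ny), visited, True))
--     return best
-- ===== Notes on version B (the rewrite author's own statement) =====
-- stated objective: alternative
-- what changed: A's recursive move() with per-call max() over child results is replaced by an iterative DFS over an explicit stack of (position, visited-set, jumped) states seeded with every cell, maintaining a single running maximum of visited-set sizes.
-- crash fix: On boards with no cell (empty board or all rows empty) A raises ValueError from max() on an empty list; B returns 0. — e.g. on solution([]): A raises ValueError, B returns 0
import Mathlib
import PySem

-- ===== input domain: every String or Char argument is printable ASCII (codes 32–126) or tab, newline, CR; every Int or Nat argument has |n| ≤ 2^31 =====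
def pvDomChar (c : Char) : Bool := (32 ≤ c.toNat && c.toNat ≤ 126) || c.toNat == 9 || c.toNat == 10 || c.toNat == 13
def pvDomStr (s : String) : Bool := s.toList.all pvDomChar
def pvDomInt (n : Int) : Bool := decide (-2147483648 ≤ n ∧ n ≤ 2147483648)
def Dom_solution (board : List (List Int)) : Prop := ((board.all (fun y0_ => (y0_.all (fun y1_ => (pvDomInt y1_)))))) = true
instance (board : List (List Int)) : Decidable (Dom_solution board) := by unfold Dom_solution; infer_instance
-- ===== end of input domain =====

-- B replaces A's recursive DFS by an iterative DFS over an explicit stack of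
-- (position, visited-set, jumped) states with a running maximum (objective: alternative).

-- ===== PORT A =====

-- get_v(pos, board): None outside the board (the bound checks make .toNat exact)
def pvGetV (pos : Int × Int) (board : List (List Int)) : Option Int :=
  if 0 ≤ pos.1 ∧ pos.1 < (board.length : Int) then
    let row := board.getD pos.1.toNat []
    if 0 ≤ pos.2 ∧ pos.2 < (row.length : Int) then some (row.getD pos.2.toNat 0)
    else none
  else none

-- Python truthiness of a get_v result (None and 0 are falsy)
def pvTruthy (o : Option Int) : Bool :=
  match o with
  | some v => v != 0
  | none => false

-- move(curr_pos, passed, board, jumped); fuel only makes the recursion total —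
-- solution passes cells+1, enough for the recursion depth (|passed| grows each call).
-- curr_v is stored as (pvGetV …).getD 0: every call site has curr in bounds.
def pvMove (board : List (List Int)) : Nat → Int × Int → List (Int × Int) → Bool → Int
  | 0, _, passed0, _ => (passed0.length : Int)
  | fuel + 1, curr, passed0, jumped =>
    let passed := PySem.Set.add passed0 curr
    let currV := (pvGetV curr board).getD 0
    let available := [(curr.1 + 1, curr.2), (curr.1 - 1, curr.2), (curr.1, curr.2 - 1), (curr.1, curr.2 + 1)]
    let validSteps := available.filterMap (fun p =>
      if ¬ (PySem.Set.contains passed p = true) ∧ pvTruthy (pvGetV p board) = true then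
        some (p, (pvGetV p board).getD 0)
      else none)
    let paths := validSteps.map (fun pv =>
      if currV < pv.2 then pvMove board fuel pv.1 passed jumped
      else if jumped = false ∧ pv.2 < currV then pvMove board fuel pv.1 passed true
      else (passed.length : Int))
    match PySem.List.max? paths (fun x => x) with
    | some m => m
    | none => (passed.length : Int)

def solution (board : List (List Int)) : Int :=
  let answers := (PySem.List.pyRange 0 (PySem.List.len board) 1).flatMap (fun i =>
    (PySem.List.pyRange 0 (PySem.List.len (PySem.List.pyGetD board i [])) 1).map (fun j =>
      pvMove board ((board.map List.length).sum + 1) (i, j) [] false))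
  match PySem.List.max? answers (fun x => x) with
  | some m => m
  | none => 0    -- max([]) raises ValueError in Python; excluded by Pre_solution

-- ===== PORT B =====

-- the states pushed for one popped state (the body of B's inner for-loop);
-- the bound checks make the .toNat indexing exact
def pvPushed (board : List (List Int)) (pos : Int × Int) (visited : List (Int × Int)) (jumped : Bool) :
    List ((Int × Int) × List (Int × Int) × Bool) :=
  let cur := (board.getD pos.1.toNat []).getD pos.2.toNat 0
  [(pos.1 + 1, pos.2), (pos.1 - 1, pos.2), (pos.1, pos.2 - 1), (pos.1, pos.2 + 1)].filterMap (fun p =>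
    if 0 ≤ p.1 ∧ p.1 < (board.length : Int) ∧ 0 ≤ p.2 ∧ p.2 < ((board.getD p.1.toNat []).length : Int) then
      let v := (board.getD p.1.toNat []).getD p.2.toNat 0
      if ¬ v = 0 ∧ ¬ (PySem.Set.contains visited p = true) then
        if cur < v then some (p, visited, jumped)
        else if jumped = false ∧ v < cur then some (p, visited, true)
        else none
      else none
    else none)

-- the while-loop; the stack's head is its Python top (list end): Python appends the
-- pushes in order and pops the last, hence `.reverse ++ rest`. fuel only makes the
-- loop total; solution_alt passes enough for the whole traversal.
def pvRunB (board : List (List Int)) : Nat → List ((Int × Int) × List (Int × Int) × Bool) → Int → Int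
  | 0, _, best => best
  | _ + 1, [], best => best
  | fuel + 1, s :: rest, best =>
    let visited := PySem.Set.add s.2.1 s.1
    let best' := if best < (visited.length : Int) then (visited.length : Int) else best
    pvRunB board fuel ((pvPushed board s.1 visited s.2.2).reverse ++ rest) best'

-- the seeding comprehension (row-major, empty visited set, jumped = False)
def pvSeeds (board : List (List Int)) : List ((Int × Int) × List (Int × Int) × Bool) :=
  (PySem.List.pyRange 0 (PySem.List.len board) 1).flatMap (fun i =>
    (PySem.List.pyRange 0 (PySem.List.len (PySem.List.pyGetD board i [])) 1).map (fun j =>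
      ((i, j), ([] : List (Int × Int)), false)))

def solution_alt (board : List (List Int)) : Int :=
  let stack := (pvSeeds board).reverse
  pvRunB board (stack.length * 5 ^ ((board.map List.length).sum + 1)) stack 0

-- ===== PRECONDITION & SPEC =====
-- Pre_ excludes boards with no cell at all (every row empty): there Python's max([])
-- raises ValueError.
def Pre_solution (board : List (List Int)) : Prop := (board.map List.length).sum ≠ 0
instance (board : List (List Int)) : Decidable (Pre_solution board) := by unfold Pre_solution; infer_instance

def pvWitness_solution : List (List Int) := [[1]]

-- A raises ValueError (max() of the empty answers list) exactly when the board has no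
-- cell; B's running maximum starts at 0 and is returned unchanged there.
def Raises_solution (board : List (List Int)) : Prop := (board.map List.length).sum = 0
instance (board : List (List Int)) : Decidable (Raises_solution board) := by unfold Raises_solution; infer_instance
def pvRaiseWitness_solution : List (List Int) := []
def pvRaiseWitnessOut_solution : Int := 0

def Spec_solution (board : List (List Int)) (out : Int) : Prop := out = solution_alt board
instance (board : List (List Int)) (out : Int) : Decidable (Spec_solution board out) := by unfold Spec_solution; infer_instance

-- ===== CLAIM (what is proved, stated in full; the proofs are below) =====
def Claim_equal_solution : Prop := ∀ (board : List (List Int)), Dom_solution board → Pre_solution board → Spec_solution board (solution board)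
def Claim_raises_solution : Prop := (∀ (board : List (List Int)), Dom_solution board → Raises_solution board → ¬ Pre_solution board) ∧ (Dom_solution (pvRaiseWitness_solution) ∧ Raises_solution (pvRaiseWitness_solution) ∧ solution_alt (pvRaiseWitness_solution) = pvRaiseWitnessOut_solution)

-- ===== LEMMAS AND PROOFS =====

-- `p` is an in-bounds cell of the board
def pvInB (board : List (List Int)) (p : Int × Int) : Prop :=
  0 ≤ p.1 ∧ p.1 < (board.length : Int) ∧ 0 ≤ p.2 ∧ p.2 < ((board.getD p.1.toNat []).length : Int)

-- invariant of every state ever on B's stack / every call of A's move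
def pvGood (board : List (List Int)) (s : (Int × Int) × List (Int × Int) × Bool) : Prop :=
  pvInB board s.1 ∧ s.1 ∉ s.2.1 ∧ (∀ q ∈ s.2.1, pvInB board q) ∧ s.2.1.Nodup

-- the value A's move computes for a state, at the fuel discipline solution uses
def pvVal (board : List (List Int)) (s : (Int × Int) × List (Int × Int) × Bool) : Int :=
  pvMove board ((board.map List.length).sum + 1 - s.2.1.length) s.1 s.2.1 s.2.2

def pvBest (board : List (List Int)) (stack : List ((Int × Int) × List (Int × Int) × Bool)) (b : Int) : Int :=
  stack.foldl (fun a s => max a (pvVal board s)) b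

def pvMu (N : Nat) (stack : List ((Int × Int) × List (Int × Int) × Bool)) : Nat :=
  (stack.map (fun s => 5 ^ (N + 1 - s.2.1.length))).sum

def pvCellsAux : List (List Int) → Nat → List (Int × Int)
  | [], _ => []
  | r :: rs, i => (List.range r.length).map (fun j : Nat => ((i : Int), (j : Int))) ++ pvCellsAux rs (i + 1)

theorem pv_length_cellsAux (bs : List (List Int)) (i : Nat) :
    (pvCellsAux bs i).length = (bs.map List.length).sum := by
  induction bs generalizing i with
  | nil => rfl
  | cons r rs ih => simp [pvCellsAux, ih]

theorem pv_mem_cellsAux (bs : List (List Int)) (i : Nat) (p : Int × Int)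
    (h1 : 0 ≤ p.1) (h2 : p.1 < (bs.length : Int)) (h3 : 0 ≤ p.2)
    (h4 : p.2 < ((bs.getD p.1.toNat []).length : Int)) :
    ((p.1 + (i : Int), p.2) : Int × Int) ∈ pvCellsAux bs i := by
  induction bs generalizing i p with
  | nil => simp at h2; omega
  | cons r rs ih =>
    simp only [pvCellsAux, List.mem_append]
    by_cases h0 : p.1 = 0
    · left
      have hlen : p.2 < (r.length : Int) := by
        have ht : p.1.toNat = 0 := by omega
        rw [ht] at h4
        simpa using h4
      refine List.mem_map.2 ⟨p.2.toNat, List.mem_range.2 (by omega), ?_⟩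
      have : (p.2.toNat : Int) = p.2 := by omega
      rw [Prod.ext_iff]
      constructor
      · simp; omega
      · simpa using this
    · right
      have h1' : 0 ≤ p.1 - 1 := by omega
      have h2' : p.1 - 1 < (rs.length : Int) := by
        simp only [List.length_cons] at h2; push_cast at h2; omega
      have h4' : p.2 < ((rs.getD (p.1 - 1).toNat []).length : Int) := by
        have ht : p.1.toNat = (p.1 - 1).toNat + 1 := by omega
        rw [ht] at h4
        simpa using h4
      have := ih (i + 1) ⟨p.1 - 1, p.2⟩ h1' h2' h3 h4'
      simp only at this
      push_cast at this ⊢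
      rw [show p.1 - 1 + ((i : Int) + 1) = p.1 + (i : Int) by ring] at this
      exact this

-- a good state's visited set has at most as many members as the board has cells
theorem pv_good_len_le (board : List (List Int)) (s : (Int × Int) × List (Int × Int) × Bool)
    (h : pvGood board s) : s.2.1.length ≤ (board.map List.length).sum := by
  obtain ⟨_, _, hin, hnd⟩ := h
  have hsub : s.2.1 ⊆ pvCellsAux board 0 := by
    intro p hp
    obtain ⟨h1, h2, h3, h4⟩ := hin p hp
    have := pv_mem_cellsAux board 0 p h1 h2 h3 h4
    simpa using this
  have := (List.subperm_of_subset hnd hsub).length_le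
  rw [pv_length_cellsAux] at this
  exact this

theorem pv_length_add (s : List (Int × Int)) (x : Int × Int) :
    (PySem.Set.add s x).length = if x ∈ s then s.length else s.length + 1 := by
  by_cases h : x ∈ s
  · simp [h]
  · simp [h]

theorem pv_move_lower' (board : List (List Int)) (fuel : Nat) (p : Int × Int)
    (vis : List (Int × Int)) (j : Bool) :
    ((vis.length : Int)) ≤ pvMove board fuel p vis j := by
  induction fuel generalizing p vis j with
  | zero => simp [pvMove]
  | succ fuel ih =>
    have hvp : (vis.length : Int) ≤ ((PySem.Set.add vis p).length : Int) := by
      have : vis.length ≤ (PySem.Set.add vis p).length := by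
        rw [pv_length_add]; split <;> omega
      exact_mod_cast this
    rw [pvMove]
    split
    · next m heq =>
      have hmem := PySem.List.max?_mem heq
      rcases List.mem_map.1 hmem with ⟨pv, hpv, rfl⟩
      split_ifs
      · exact le_trans hvp (ih _ _ _)
      · exact le_trans hvp (ih _ _ _)
      · exact hvp
    · exact hvp

-- pull a max out of a running-max fold
theorem pv_foldl_max_out {α : Type} (g : α → Int) (l : List α) (b x : Int) :
    l.foldl (fun a s => max a (g s)) (max b x) = max (l.foldl (fun a s => max a (g s)) b) x := by
  induction l generalizing b with
  | nil => simp
  | cons y t ih =>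
    simp only [List.foldl_cons]
    rw [max_right_comm, ih]

theorem pv_best_reverse (board : List (List Int)) (l : List ((Int × Int) × List (Int × Int) × Bool)) (b : Int) :
    pvBest board l.reverse b = pvBest board l b := by
  induction l generalizing b with
  | nil => rfl
  | cons y t ih =>
    simp only [pvBest, List.reverse_cons, List.foldl_append, List.foldl_cons, List.foldl_nil]
    rw [show ∀ z : Int, t.reverse.foldl (fun a s => max a (pvVal board s)) z =
          pvBest board t.reverse z from fun _ => rfl, ih]
    simp only [pvBest]
    rw [pv_foldl_max_out]

-- max(paths) with a lower bound on the entries is the running-max fold from that bound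
theorem pv_max_match (paths : List Int) (c : Int) (h : ∀ y ∈ paths, c ≤ y) :
    (match PySem.List.max? paths (fun x => x) with
     | some m => m
     | none => c) = paths.foldl max c := by
  cases paths with
  | nil => simp [PySem.List.max?]
  | cons x t =>
    rw [PySem.List.max?_id_cons x t]
    simp only [List.foldl_cons]
    rw [max_eq_right (h x (by simp))]

-- the abstract one-step correspondence between B's pushes and A's paths
theorem pv_fold_aux {π β σ : Type} (fB : π → Option σ) (fA : π → Option β)
    (branch : β → Int) (V : σ → Int) (c : Int) :
    ∀ (L : List π), (∀ q ∈ L,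
        (fB q = none ∧ fA q = none) ∨
        (∃ ch x, fB q = some ch ∧ fA q = some x ∧ branch x = V ch) ∨
        (fB q = none ∧ ∃ x, fA q = some x ∧ branch x = c)) →
      ∀ b : Int,
      (L.filterMap fB).foldl (fun a s => max a (V s)) (max b c)
        = max b (((L.filterMap fA).map branch).foldl max c) := by
  intro L hL
  induction L with
  | nil => intro b; simp
  | cons q t ih =>
    intro b
    have hq := hL q (by simp)
    have ht : ∀ q' ∈ t, (fB q' = none ∧ fA q' = none) ∨
        (∃ ch x, fB q' = some ch ∧ fA q' = some x ∧ branch x = V ch) ∨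
        (fB q' = none ∧ ∃ x, fA q' = some x ∧ branch x = c) :=
      fun q' hq' => hL q' (by simp [hq'])
    rcases hq with ⟨hB, hA⟩ | ⟨ch, x, hB, hA, hbr⟩ | ⟨hB, x, hA, hbr⟩
    · simp only [List.filterMap_cons, hB, hA]
      exact ih ht b
    · simp only [List.filterMap_cons, hB, hA, List.map_cons, List.foldl_cons]
      rw [max_right_comm, ih ht (max b (V ch)), pv_foldl_max_out (fun y => y)]
      rw [← hbr]
      rw [max_assoc, max_comm (((t.filterMap fA).map branch).foldl max c) (branch x),
        ← max_assoc]
    · simp only [List.filterMap_cons, hB, hA, List.map_cons, List.foldl_cons]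
      rw [hbr, max_self]
      exact ih ht b


theorem pv_truthy_iff (board : List (List Int)) (q : Int × Int) :
    pvTruthy (pvGetV q board) = true ↔
      (pvInB board q ∧ (board.getD q.1.toNat []).getD q.2.toNat 0 ≠ 0) := by
  unfold pvTruthy pvGetV pvInB
  by_cases h1 : 0 ≤ q.1 ∧ q.1 < (board.length : Int)
  · rw [if_pos h1]
    by_cases h2 : 0 ≤ q.2 ∧ q.2 < ((board.getD q.1.toNat []).length : Int)
    · rw [if_pos h2]; simp; tauto
    · rw [if_neg h2]; simp; tauto
  · rw [if_neg h1]; simp; tauto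

theorem pv_getV_eq (board : List (List Int)) (q : Int × Int) (h : pvInB board q) :
    pvGetV q board = some ((board.getD q.1.toNat []).getD q.2.toNat 0) := by
  obtain ⟨h1, h2, h3, h4⟩ := h
  unfold pvGetV
  rw [if_pos ⟨h1, h2⟩, if_pos ⟨h3, h4⟩]

theorem pv_sum_const {α : Type} (f : α → Nat) (k : Nat) :
    ∀ l : List α, (∀ x ∈ l, f x = k) → (l.map f).sum = l.length * k := by
  intro l h
  induction l with
  | nil => simp
  | cons x t ih =>
    simp only [List.map_cons, List.sum_cons, List.length_cons, h x (by simp)]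
    rw [ih (fun y hy => h y (by simp [hy]))]
    ring

-- one pop of B's loop accounts exactly for one call of A's move
theorem pv_step (board : List (List Int)) (s : (Int × Int) × List (Int × Int) × Bool)
    (hg : pvGood board s) (b : Int) :
    (pvPushed board s.1 (PySem.Set.add s.2.1 s.1) s.2.2).foldl (fun a c => max a (pvVal board c))
        (max b ((PySem.Set.add s.2.1 s.1).length : Int))
      = max b (pvVal board s) := by
  obtain ⟨p, vis, j⟩ := s
  obtain ⟨hInB, hnm, hvin, hnd⟩ := hg
  have hlen : vis.length ≤ (board.map List.length).sum :=
    pv_good_len_le board (p, vis, j) ⟨hInB, hnm, hvin, hnd⟩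
  have hvl : (PySem.Set.add vis p).length = vis.length + 1 := by
    rw [pv_length_add]; simp [hnm]
  have hcur : (pvGetV p board).getD 0 = (board.getD p.1.toNat []).getD p.2.toNat 0 := by
    rw [pv_getV_eq board p hInB]; rfl
  have hval : pvVal board (p, vis, j)
      = pvMove board (((board.map List.length).sum - vis.length) + 1) p vis j := by
    show pvMove board ((board.map List.length).sum + 1 - vis.length) p vis j = _
    rw [show (board.map List.length).sum + 1 - vis.length
        = ((board.map List.length).sum - vis.length) + 1 by omega]
  show (pvPushed board p (PySem.Set.add vis p) j).foldl
      (fun a c => max a (pvVal board c)) (max b ((PySem.Set.add vis p).length : Int))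
    = max b (pvVal board (p, vis, j))
  rw [hval, pvMove]
  have hall : ∀ y ∈ (([(p.1 + 1, p.2), (p.1 - 1, p.2), (p.1, p.2 - 1), (p.1, p.2 + 1)].filterMap
        (fun q =>
          if ¬ (PySem.Set.contains (PySem.Set.add vis p) q = true) ∧ pvTruthy (pvGetV q board) = true then
            some (q, (pvGetV q board).getD 0) else none)).map (fun pv =>
          if (pvGetV p board).getD 0 < pv.2 then
            pvMove board ((board.map List.length).sum - vis.length) pv.1 (PySem.Set.add vis p) j
          else if j = false ∧ pv.2 < (pvGetV p board).getD 0 then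
            pvMove board ((board.map List.length).sum - vis.length) pv.1 (PySem.Set.add vis p) true
          else ((PySem.Set.add vis p).length : Int))),
      ((PySem.Set.add vis p).length : Int) ≤ y := by
    intro y hy
    rcases List.mem_map.1 hy with ⟨pv, hpv, rfl⟩
    split_ifs
    · exact pv_move_lower' board _ _ _ _
    · exact pv_move_lower' board _ _ _ _
    · exact le_refl _
  show (pvPushed board p (PySem.Set.add vis p) j).foldl
      (fun a c => max a (pvVal board c)) (max b ((PySem.Set.add vis p).length : Int))
    = max b (match PySem.List.max? (([(p.1 + 1, p.2), (p.1 - 1, p.2), (p.1, p.2 - 1), (p.1, p.2 + 1)].filterMap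
        (fun q =>
          if ¬ (PySem.Set.contains (PySem.Set.add vis p) q = true) ∧ pvTruthy (pvGetV q board) = true then
            some (q, (pvGetV q board).getD 0) else none)).map (fun pv =>
          if (pvGetV p board).getD 0 < pv.2 then
            pvMove board ((board.map List.length).sum - vis.length) pv.1 (PySem.Set.add vis p) j
          else if j = false ∧ pv.2 < (pvGetV p board).getD 0 then
            pvMove board ((board.map List.length).sum - vis.length) pv.1 (PySem.Set.add vis p) true
          else ((PySem.Set.add vis p).length : Int))) (fun x => x) with
        | some m => m
        | none => ((PySem.Set.add vis p).length : Int))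
  rw [pv_max_match _ _ hall]
  refine pv_fold_aux
    (fun q =>
      if 0 ≤ q.1 ∧ q.1 < (board.length : Int) ∧ 0 ≤ q.2 ∧ q.2 < ((board.getD q.1.toNat []).length : Int) then
        if ¬ (board.getD q.1.toNat []).getD q.2.toNat 0 = 0 ∧
            ¬ (PySem.Set.contains (PySem.Set.add vis p) q = true) then
          if (board.getD p.1.toNat []).getD p.2.toNat 0 < (board.getD q.1.toNat []).getD q.2.toNat 0 then
            some (q, PySem.Set.add vis p, j)
          else if j = false ∧ (board.getD q.1.toNat []).getD q.2.toNat 0 < (board.getD p.1.toNat []).getD p.2.toNat 0 then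
            some (q, PySem.Set.add vis p, true)
          else none
        else none
      else none)
    _ _ (pvVal board) _ _ ?_ b
  intro q hq
  by_cases hin : pvInB board q
  · have hgv : pvGetV q board = some ((board.getD q.1.toNat []).getD q.2.toNat 0) :=
      pv_getV_eq board q hin
    by_cases hv0 : (board.getD q.1.toNat []).getD q.2.toNat 0 = 0
    · refine Or.inl ⟨?_, ?_⟩
      · beta_reduce
        rw [if_pos (by exact hin), if_neg (fun hcc => hcc.1 hv0)]
      · beta_reduce
        rw [if_neg (fun hcc => ((pv_truthy_iff board q).1 hcc.2).2 hv0)]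
    · by_cases hmem : q ∈ PySem.Set.add vis p
      · refine Or.inl ⟨?_, ?_⟩
        · beta_reduce
          rw [if_pos (by exact hin), if_neg (fun hcc => hcc.2 ((PySem.Set.contains_iff _ _).2 hmem))]
        · beta_reduce
          rw [if_neg (fun hcc => hcc.1 ((PySem.Set.contains_iff _ _).2 hmem))]
      · have hcontf : ¬ (PySem.Set.contains (PySem.Set.add vis p) q = true) :=
          fun h => hmem ((PySem.Set.contains_iff _ _).1 h)
        have htr : pvTruthy (pvGetV q board) = true := (pv_truthy_iff board q).2 ⟨hin, hv0⟩
        have hA : (if ¬ (PySem.Set.contains (PySem.Set.add vis p) q = true) ∧ pvTruthy (pvGetV q board) = true then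
              some (q, (pvGetV q board).getD 0) else none)
            = some (q, (board.getD q.1.toNat []).getD q.2.toNat 0) := by
          rw [if_pos ⟨hcontf, htr⟩, hgv]; rfl
        have hVch : ∀ j' : Bool, pvVal board (q, PySem.Set.add vis p, j')
            = pvMove board ((board.map List.length).sum - vis.length) q (PySem.Set.add vis p) j' := by
          intro j'
          show pvMove board ((board.map List.length).sum + 1 - (PySem.Set.add vis p).length) q _ j' = _
          rw [show (board.map List.length).sum + 1 - (PySem.Set.add vis p).length
              = (board.map List.length).sum - vis.length by omega]
        by_cases hgt : (board.getD p.1.toNat []).getD p.2.toNat 0 < (board.getD q.1.toNat []).getD q.2.toNat 0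
        · refine Or.inr (Or.inl ⟨(q, PySem.Set.add vis p, j), (q, (board.getD q.1.toNat []).getD q.2.toNat 0), ?_, hA, ?_⟩)
          · beta_reduce
            rw [if_pos (by exact hin), if_pos ⟨hv0, hcontf⟩, if_pos hgt]
          · beta_reduce
            rw [hcur, if_pos hgt, hVch]
        · by_cases hlt : j = false ∧ (board.getD q.1.toNat []).getD q.2.toNat 0 < (board.getD p.1.toNat []).getD p.2.toNat 0
          · refine Or.inr (Or.inl ⟨(q, PySem.Set.add vis p, true), (q, (board.getD q.1.toNat []).getD q.2.toNat 0), ?_, hA, ?_⟩)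
            · simp only
              rw [if_pos (by exact hin), if_pos ⟨hv0, hcontf⟩, if_neg hgt, if_pos hlt]
            · simp only
              rw [hcur, if_neg hgt, if_pos hlt, hVch]
          · refine Or.inr (Or.inr ⟨?_, (q, (board.getD q.1.toNat []).getD q.2.toNat 0), hA, ?_⟩)
            · simp only
              rw [if_pos (by exact hin), if_pos ⟨hv0, hcontf⟩, if_neg hgt, if_neg hlt]
            · simp only
              rw [hcur, if_neg hgt, if_neg hlt]
  · refine Or.inl ⟨?_, ?_⟩
    · have hin' : ¬ (0 ≤ q.1 ∧ q.1 < (board.length : Int) ∧ 0 ≤ q.2 ∧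
          q.2 < ((board.getD q.1.toNat []).length : Int)) := fun hc => hin hc
      beta_reduce
      rw [if_neg hin']
    · beta_reduce
      rw [if_neg (fun hcc => hin ((pv_truthy_iff board q).1 hcc.2).1)]

-- every pushed child is again good
theorem pv_pushed_good (board : List (List Int)) (s : (Int × Int) × List (Int × Int) × Bool)
    (hg : pvGood board s) :
    ∀ c ∈ pvPushed board s.1 (PySem.Set.add s.2.1 s.1) s.2.2,
      pvGood board c ∧ c.2.1 = PySem.Set.add s.2.1 s.1 := by
  intro c hc
  obtain ⟨hInB, hnm, hvin, hnd⟩ := hg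
  rcases List.mem_filterMap.1 hc with ⟨q, _, heq⟩
  simp only at heq
  split_ifs at heq with hb hvv hgt hlt
  · -- pushed without a jump
    obtain rfl : c = (q, PySem.Set.add s.2.1 s.1, s.2.2) := by
      injection heq with h; exact h.symm
    refine ⟨⟨⟨hb.1, hb.2.1, hb.2.2.1, hb.2.2.2⟩, ?_, ?_, PySem.Set.nodup_add _ _ hnd⟩, rfl⟩
    · exact fun hmem => hvv.2 ((PySem.Set.contains_iff _ _).2 hmem)
    · intro x hx
      rcases (PySem.Set.mem_add _ _ _).1 hx with hx | hx
      · exact hvin x hx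
      · subst hx; exact hInB
  · -- pushed with the jump used
    obtain rfl : c = (q, PySem.Set.add s.2.1 s.1, true) := by
      injection heq with h; exact h.symm
    refine ⟨⟨⟨hb.1, hb.2.1, hb.2.2.1, hb.2.2.2⟩, ?_, ?_, PySem.Set.nodup_add _ _ hnd⟩, rfl⟩
    · exact fun hmem => hvv.2 ((PySem.Set.contains_iff _ _).2 hmem)
    · intro x hx
      rcases (PySem.Set.mem_add _ _ _).1 hx with hx | hx
      · exact hvin x hx
      · subst hx; exact hInB

-- the main loop invariant: with enough fuel, B's loop folds A's values over the stack
theorem pv_run (board : List (List Int)) (fuel : Nat) :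
    ∀ (stack : List ((Int × Int) × List (Int × Int) × Bool)) (best : Int),
      (∀ s ∈ stack, pvGood board s) → pvMu (board.map List.length).sum stack ≤ fuel →
      pvRunB board fuel stack best = pvBest board stack best := by
  induction fuel with
  | zero =>
    intro stack best hgood hmu
    cases stack with
    | nil => rfl
    | cons s rest =>
      exfalso
      have h1 : 1 ≤ 5 ^ ((board.map List.length).sum + 1 - s.2.1.length) :=
        Nat.one_le_pow _ _ (by norm_num)
      simp only [pvMu, List.map_cons, List.sum_cons] at hmu
      omega
  | succ fuel ih =>
    intro stack best hgood hmu
    cases stack with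
    | nil => rfl
    | cons s rest =>
      have hg := hgood s (by simp)
      have hlen : s.2.1.length ≤ (board.map List.length).sum := pv_good_len_le board s hg
      have hvl : (PySem.Set.add s.2.1 s.1).length = s.2.1.length + 1 := by
        rw [pv_length_add]; simp [hg.2.1]
      rw [pvRunB]
      have hbest : (if best < ((PySem.Set.add s.2.1 s.1).length : Int)
            then ((PySem.Set.add s.2.1 s.1).length : Int) else best)
          = max best ((PySem.Set.add s.2.1 s.1).length : Int) := by
        rw [max_def]; split_ifs <;> omega
      have hpg := pv_pushed_good board s hg
      have hgood' : ∀ t ∈ (pvPushed board s.1 (PySem.Set.add s.2.1 s.1) s.2.2).reverse ++ rest,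
          pvGood board t := by
        intro t ht
        rcases List.mem_append.1 ht with ht | ht
        · exact (hpg t (List.mem_reverse.1 ht)).1
        · exact hgood t (by simp [ht])
      have hmu' : pvMu (board.map List.length).sum
          ((pvPushed board s.1 (PySem.Set.add s.2.1 s.1) s.2.2).reverse ++ rest) ≤ fuel := by
        have hpu : pvMu (board.map List.length).sum
            ((pvPushed board s.1 (PySem.Set.add s.2.1 s.1) s.2.2).reverse)
            ≤ 4 * 5 ^ ((board.map List.length).sum - s.2.1.length) := by
          unfold pvMu
          have hconst : ∀ t ∈ (pvPushed board s.1 (PySem.Set.add s.2.1 s.1) s.2.2).reverse,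
              (fun t => 5 ^ ((board.map List.length).sum + 1 - t.2.1.length)) t
                = 5 ^ ((board.map List.length).sum - s.2.1.length) := by
            intro t ht
            have := (hpg t (List.mem_reverse.1 ht)).2
            simp only [this, hvl]
            congr 1
            omega
          rw [pv_sum_const _ _ _ hconst]
          have h4 : ((pvPushed board s.1 (PySem.Set.add s.2.1 s.1) s.2.2).reverse).length ≤ 4 := by
            rw [List.length_reverse]
            exact le_trans (List.length_filterMap_le _ _) (by simp)
          exact Nat.mul_le_mul_right _ h4
        simp only [pvMu, List.map_append, List.sum_append] at hpu ⊢
        simp only [pvMu, List.map_cons, List.sum_cons] at hmu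
        have hs5 : 5 ^ ((board.map List.length).sum + 1 - s.2.1.length)
            = 5 * 5 ^ ((board.map List.length).sum - s.2.1.length) := by
          rw [show (board.map List.length).sum + 1 - s.2.1.length
              = ((board.map List.length).sum - s.2.1.length) + 1 by omega]
          ring
        have h1 : 1 ≤ 5 ^ ((board.map List.length).sum - s.2.1.length) :=
          Nat.one_le_pow _ _ (by norm_num)
        omega
      rw [show (if best < ((PySem.Set.add s.2.1 s.1).length : Int)
            then ((PySem.Set.add s.2.1 s.1).length : Int) else best)
          = max best ((PySem.Set.add s.2.1 s.1).length : Int) from hbest]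
      rw [ih _ _ hgood' hmu']
      show pvBest board ((pvPushed board s.1 (PySem.Set.add s.2.1 s.1) s.2.2).reverse ++ rest)
          (max best ((PySem.Set.add s.2.1 s.1).length : Int)) = _
      unfold pvBest
      rw [List.foldl_append]
      have hrev : ((pvPushed board s.1 (PySem.Set.add s.2.1 s.1) s.2.2).reverse).foldl
            (fun a t => max a (pvVal board t)) (max best ((PySem.Set.add s.2.1 s.1).length : Int))
          = (pvPushed board s.1 (PySem.Set.add s.2.1 s.1) s.2.2).foldl
            (fun a t => max a (pvVal board t)) (max best ((PySem.Set.add s.2.1 s.1).length : Int)) :=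
        pv_best_reverse board _ _
      rw [hrev, pv_step board s hg best]
      rfl

theorem pv_sum_getD (bs : List (List Int)) :
    ((List.range bs.length).map (fun k => (bs.getD k []).length)).sum = (bs.map List.length).sum := by
  induction bs with
  | nil => rfl
  | cons r rs ih =>
    rw [List.length_cons, List.range_succ_eq_map]
    simp only [List.map_cons, List.map_map, List.sum_cons, Function.comp_def, List.getD_cons_zero,
      List.getD_cons_succ]
    rw [ih]

theorem pv_seeds_good (board : List (List Int)) : ∀ s ∈ pvSeeds board, pvGood board s := by
  intro s hs
  unfold pvSeeds at hs
  rcases List.mem_flatMap.1 hs with ⟨i, hi, hs⟩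
  rcases List.mem_map.1 hs with ⟨jj, hj, rfl⟩
  simp only [PySem.List.len_eq] at hi hj
  obtain ⟨hi0, hi1⟩ := PySem.List.mem_pyRange_one.1 hi
  obtain ⟨hj0, hj1⟩ := PySem.List.mem_pyRange_one.1 hj
  have hrow : PySem.List.pyGetD board i [] = board.getD i.toNat [] := by
    conv_lhs => rw [show i = ((i.toNat : Nat) : Int) by omega]
    rw [PySem.List.pyGetD_natCast]
  rw [hrow] at hj1
  exact ⟨⟨hi0, by simpa using hi1, hj0, hj1⟩, by simp, by simp, by simp⟩

theorem pv_seeds_vis (board : List (List Int)) : ∀ s ∈ pvSeeds board, s.2.1 = ([] : List (Int × Int)) := by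
  intro s hs
  unfold pvSeeds at hs
  rcases List.mem_flatMap.1 hs with ⟨i, _, hs⟩
  rcases List.mem_map.1 hs with ⟨jj, _, rfl⟩
  rfl

theorem pv_seeds_length (board : List (List Int)) :
    (pvSeeds board).length = (board.map List.length).sum := by
  unfold pvSeeds
  rw [List.length_flatMap]
  simp only [PySem.List.len_eq, PySem.List.pyRange_zero_natCast, List.map_map, Function.comp_def,
    List.length_map, PySem.List.pyGetD_natCast]
  simpa using pv_sum_getD board

-- ===== VERDICT (by name: the statement is the Claim_ definition above) =====
theorem solution_spec : Claim_equal_solution := by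
  intro board _ hpre
  unfold Spec_solution
  have hgoodrev : ∀ s ∈ (pvSeeds board).reverse, pvGood board s :=
    fun s hs => pv_seeds_good board s (List.mem_reverse.1 hs)
  have hmu : pvMu (board.map List.length).sum ((pvSeeds board).reverse)
      = ((pvSeeds board).reverse).length * 5 ^ ((board.map List.length).sum + 1) := by
    unfold pvMu
    refine pv_sum_const _ _ _ ?_
    intro t ht
    have hv := pv_seeds_vis board t (List.mem_reverse.1 ht)
    simp [hv]
  have hB : solution_alt board = pvBest board (pvSeeds board) 0 := by
    unfold solution_alt
    rw [pv_run board _ _ 0 hgoodrev (le_of_eq hmu)]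
    exact pv_best_reverse board _ 0
  have hmap : (PySem.List.pyRange 0 (PySem.List.len board) 1).flatMap (fun i =>
      (PySem.List.pyRange 0 (PySem.List.len (PySem.List.pyGetD board i [])) 1).map (fun j =>
        pvMove board ((board.map List.length).sum + 1) (i, j) [] false))
      = (pvSeeds board).map (pvVal board) := by
    unfold pvSeeds
    rw [List.map_flatMap]
    congr 1
    funext i
    rw [List.map_map]
    rfl
  unfold solution
  rw [hmap, hB]
  cases hseeds : pvSeeds board with
  | nil =>
    exfalso
    have := pv_seeds_length board
    rw [hseeds] at this
    exact hpre this.symm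
  | cons x t =>
    show (match PySem.List.max? ((x :: t).map (pvVal board)) (fun y => y) with
      | some m => m
      | none => 0) = pvBest board (x :: t) 0
    rw [List.map_cons, PySem.List.max?_id_cons]
    show (t.map (pvVal board)).foldl max (pvVal board x) = _
    have h0 : max 0 (pvVal board x) = pvVal board x :=
      max_eq_right (le_trans (by positivity) (pv_move_lower' board _ _ _ _))
    unfold pvBest
    rw [List.foldl_cons, h0, List.foldl_map]

theorem solution_raises : Claim_raises_solution := by
  unfold Claim_raises_solution
  exact ⟨fun board _ h hp => hp h, by decide⟩

-- self-check: the crash-fix witness facts, extracted from solution_raises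
theorem pv_raise_witness_ok : Dom_solution (pvRaiseWitness_solution) ∧
    Raises_solution (pvRaiseWitness_solution) ∧
    solution_alt (pvRaiseWitness_solution) = pvRaiseWitnessOut_solution :=
  solution_raises.2
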